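-- pv_equiv track=rewrite | github.com/ianwhale/nsga-net | nsga2_individual.py | count_phase_connections
-- ===== SOURCE A (Python) =====
-- def count_phase_connections(genome):
--     connections = sum([sum(node) for node in genome])
--     # calculate output connection for each node
--     output_connection = [0] * len(genome)
--     for bit in range(len(genome) - 1):
--         for node in range(bit, len(genome) - 1):
--             if genome[node][bit] > 0:
--                 output_connection[bit] = 1
--                 break
--     # calculate input connection for each node
--     input_connection = [0]
--     for node in range(len(genome) - 1):
--         if sum(genome[node]) > 0:
--             input_connection.append(1)
--         else:
--             input_connection.append(0)
--     for bit in range(len(output_connection)):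
--         if output_connection[bit] != input_connection[bit]:
--             connections += 1
--
--     return connections
-- ===== SOURCE B (Python) =====
-- def count_phase_connections(genome):
--     # One row-major pass: accumulate the total, the input-connection bits and
--     # the output-connection bits together, instead of A's three separate loops
--     # (one of them column-major with a break).
--     n = len(genome)
--     connections = 0
--     output_connection = [0] * n
--     input_connection = [0]
--     for i in range(n):
--         row_sum = sum(genome[i])
--         connections += row_sum
--         if i < n - 1:
--             input_connection.append(1 if row_sum > 0 else 0)
--             for j in range(i + 1):
--                 if genome[i][j] > 0:
--                     output_connection[j] = 1
--     for bit in range(n):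
--         if output_connection[bit] != input_connection[bit]:
--             connections += 1
--     return connections
-- ===== Notes on version B (the rewrite author's own statement) =====
-- stated objective: simpler
-- what changed: A's three separate passes (a column-major scan with break for output connections, a second pass for input connections, and an upfront total) are fused into one row-major pass that accumulates the total, the input bits and the output-connection flags together, transposing the traversal of the triangular genome.
import Mathlib
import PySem

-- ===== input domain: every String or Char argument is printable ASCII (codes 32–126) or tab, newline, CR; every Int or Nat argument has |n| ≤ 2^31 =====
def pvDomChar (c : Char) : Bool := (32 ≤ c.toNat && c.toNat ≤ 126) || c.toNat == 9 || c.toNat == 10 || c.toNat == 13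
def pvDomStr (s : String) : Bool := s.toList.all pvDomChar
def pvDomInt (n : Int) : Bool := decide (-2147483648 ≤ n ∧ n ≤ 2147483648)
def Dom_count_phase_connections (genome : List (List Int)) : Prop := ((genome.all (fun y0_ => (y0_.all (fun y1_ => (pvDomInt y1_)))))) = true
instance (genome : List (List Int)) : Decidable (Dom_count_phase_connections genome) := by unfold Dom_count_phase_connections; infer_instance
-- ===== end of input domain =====

-- B fuses A's three passes (column-major break-scan for output connections, a second
-- pass for input connections, an upfront total) into one row-major pass; same cost,
-- simpler traversal of the triangular genome.

-- ===== PORT A =====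
-- inner 'for node in range(bit, len(genome)-1): if genome[node][bit] > 0: … break'
-- scan (short-circuiting 'any' = first hit stops, exactly as the break does)
def pvColScan (genome : List (List Int)) (bit : Int) (nodes : List Int) : Bool :=
  nodes.any (fun node => decide (0 < PySem.List.pyGetD (PySem.List.pyGetD genome node []) bit 0))

def count_phase_connections (genome : List (List Int)) : Int :=
  let n : Int := genome.length
  let connections : Int := (genome.map (fun node => node.sum)).sum
  let oc : List Int :=
    (PySem.List.pyRange 0 (n - 1) 1).foldl
      (fun oc bit =>
        if pvColScan genome bit (PySem.List.pyRange bit (n - 1) 1) then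
          oc.set bit.toNat 1    -- bit ≥ 0 here, so .toNat is exact
        else oc)
      (List.replicate genome.length 0)
  let ic : List Int :=
    (PySem.List.pyRange 0 (n - 1) 1).foldl
      (fun ic node =>
        if 0 < (PySem.List.pyGetD genome node []).sum then ic ++ [1] else ic ++ [0])
      [0]
  (PySem.List.pyRange 0 (oc.length : Int) 1).foldl
    (fun c bit => if PySem.List.pyGetD oc bit 0 ≠ PySem.List.pyGetD ic bit 0 then c + 1 else c)
    connections

-- ===== PORT B =====
-- the body of B's fused row loop: state is (connections, output_connection, input_connection)
def pvStepB (n : Int) (genome : List (List Int)) (st : Int × List Int × List Int) (i : Int) :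
    Int × List Int × List Int :=
  let row := PySem.List.pyGetD genome i []
  let c := st.1 + row.sum
  if i < n - 1 then
    let oc := (PySem.List.pyRange 0 (i + 1) 1).foldl
        (fun oc j => if 0 < PySem.List.pyGetD row j 0 then oc.set j.toNat 1 else oc)
        st.2.1
    (c, oc, st.2.2 ++ [if 0 < row.sum then (1 : Int) else 0])
  else (c, st.2.1, st.2.2)

def count_phase_connections_alt (genome : List (List Int)) : Int :=
  let n : Int := genome.length
  let st : Int × List Int × List Int :=
    (PySem.List.pyRange 0 n 1).foldl (pvStepB n genome)
      (0, List.replicate genome.length 0, [0])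
  (PySem.List.pyRange 0 n 1).foldl
    (fun c bit => if PySem.List.pyGetD st.2.1 bit 0 ≠ PySem.List.pyGetD st.2.2 bit 0 then c + 1 else c)
    st.1

-- ===== PRECONDITION & SPEC =====
-- Python A indexes genome[node][bit] for every bit ≤ node ≤ len-2, so it raises
-- IndexError exactly when some row i < len-1 is shorter than i+1; Pre_ excludes
-- exactly those raising inputs (the last row's length is never constrained).
def Pre_count_phase_connections (genome : List (List Int)) : Prop :=
  ∀ i < genome.length - 1, i < (genome.getD i []).length
instance (genome : List (List Int)) : Decidable (Pre_count_phase_connections genome) := by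
  unfold Pre_count_phase_connections; infer_instance
def pvWitness_count_phase_connections : List (List Int) := [[1], [0, 1], [1, 1, 0]]

def Spec_count_phase_connections (genome : List (List Int)) (out : Int) : Prop := out = count_phase_connections_alt genome
instance (genome : List (List Int)) (out : Int) : Decidable (Spec_count_phase_connections genome out) := by unfold Spec_count_phase_connections; infer_instance

-- ===== CLAIM (what is proved, stated in full; the proofs are below) =====
def Claim_equal_count_phase_connections : Prop := ∀ (genome : List (List Int)), Dom_count_phase_connections genome → Pre_count_phase_connections genome → Spec_count_phase_connections genome (count_phase_connections genome)

-- ===== LEMMAS AND PROOFS =====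

-- value genome[i][k] (0 outside), row sum, "column k has a positive entry among the
-- first m rows at or after row k", and the two intermediate lists both ports build
def pvVal (genome : List (List Int)) (i k : Nat) : Int := (genome.getD i []).getD k 0
def pvRow (genome : List (List Int)) (i : Nat) : Int := (genome.getD i []).sum
def pvHit (genome : List (List Int)) (m k : Nat) : Bool :=
  (List.range m).any (fun i => decide (k ≤ i) && decide (0 < pvVal genome i k))
def pvOcSpec (genome : List (List Int)) (m : Nat) : List Int :=
  (List.range genome.length).map (fun k => if pvHit genome m k then 1 else 0)
def pvIcSpec (genome : List (List Int)) (m : Nat) : List Int :=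
  0 :: (List.range m).map (fun i => if 0 < pvRow genome i then (1 : Int) else 0)

-- a fold of index-guarded sets preserves length
theorem pvSetFold_length (p : Int → Prop) [DecidablePred p] :
    ∀ (bits : List Int) (l : List Int),
      (bits.foldl (fun oc bit => if p bit then oc.set bit.toNat 1 else oc) l).length = l.length := by
  intro bits
  induction bits with
  | nil => intro l; rfl
  | cons b bs ih =>
      intro l
      simp only [List.foldl_cons]
      rw [ih]
      split <;> simp

-- pointwise description of a fold of sets over range(m)
theorem pvSetFold_getElem? (p : Int → Prop) [DecidablePred p] :
    ∀ (m : Nat) (l : List Int) (k : Nat), k < l.length →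
      ((PySem.List.pyRange 0 (m : Int) 1).foldl
          (fun oc bit => if p bit then oc.set bit.toNat 1 else oc) l)[k]?
        = if k < m ∧ p (k : Int) then some 1 else l[k]? := by
  intro m
  induction m with
  | zero =>
      intro l k hk
      simp [PySem.List.pyRange_one_eq_nil (by omega : (0:Int) ≤ 0)]
  | succ m ih =>
      intro l k hk
      have hcast : ((m + 1 : Nat) : Int) = (m : Int) + 1 := by push_cast; ring
      rw [hcast, PySem.List.pyRange_one_succ_right (by positivity), List.foldl_append]
      simp only [List.foldl_cons, List.foldl_nil]
      have hlen := pvSetFold_length p (PySem.List.pyRange 0 (m : Int) 1) l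
      have hmt : ((m : Int)).toNat = m := by simp
      by_cases hp : p (m : Int)
      · rw [if_pos hp, hmt]
        by_cases hkm : k = m
        · subst hkm
          rw [List.getElem?_set_self (by omega), if_pos ⟨by omega, hp⟩]
        · rw [List.getElem?_set_ne (by omega), ih l k hk]
          by_cases hlt : k < m ∧ p (k : Int)
          · rw [if_pos hlt, if_pos ⟨by omega, hlt.2⟩]
          · rw [if_neg hlt, if_neg (show ¬(k < m + 1 ∧ p (k : Int)) from fun h => hlt ⟨by omega, h.2⟩)]
      · rw [if_neg hp, ih l k hk]
        by_cases hlt : k < m ∧ p (k : Int)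
        · rw [if_pos hlt, if_pos ⟨by omega, hlt.2⟩]
        · rw [if_neg hlt]
          by_cases hkm : k = m
          · subst hkm
            rw [if_neg (fun h => hp h.2)]
          · rw [if_neg (show ¬(k < m + 1 ∧ p (k : Int)) from fun h => hlt ⟨by omega, h.2⟩)]

-- (range over length).map of a getD-reader is the map over the list itself
theorem pvMapGetD (f : List Int → Int) :
    ∀ (l : List (List Int)), (List.range l.length).map (fun i => f (l.getD i [])) = l.map f := by
  intro l
  induction l with
  | nil => rfl
  | cons x xs ih =>
      simp only [List.length_cons, List.range_succ_eq_map, List.map_cons, List.map_map]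
      exact congrArg (f x :: ·) ih

-- membership description of A's column break-scan
theorem pvColScan_iff (genome : List (List Int)) (M k : Nat) :
    pvColScan genome (k : Int) (PySem.List.pyRange (k : Int) (M : Int) 1) = true
      ↔ ∃ i : Nat, k ≤ i ∧ i < M ∧ 0 < pvVal genome i k := by
  simp only [pvColScan, List.any_eq_true, PySem.List.mem_pyRange_one, decide_eq_true_eq]
  constructor
  · rintro ⟨node, ⟨h1, h2⟩, hval⟩
    obtain ⟨i, rfl⟩ : ∃ i : Nat, node = (i : Int) := ⟨node.toNat, by omega⟩
    exact ⟨i, by omega, by omega, by simpa [pvVal, PySem.List.pyGetD_natCast] using hval⟩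
  · rintro ⟨i, h1, h2, hval⟩
    exact ⟨(i : Int), ⟨by omega, by omega⟩, by simpa [pvVal, PySem.List.pyGetD_natCast] using hval⟩

-- existential description of pvHit
theorem pvHit_iff (genome : List (List Int)) (M k : Nat) :
    pvHit genome M k = true ↔ ∃ i : Nat, k ≤ i ∧ i < M ∧ 0 < pvVal genome i k := by
  simp only [pvHit, List.any_eq_true, List.mem_range, Bool.and_eq_true, decide_eq_true_eq]
  constructor
  · rintro ⟨i, h1, h2, h3⟩; exact ⟨i, h2, h1, h3⟩
  · rintro ⟨i, h1, h2, h3⟩; exact ⟨i, h2, h1, h3⟩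

-- one row-major step of B extends pvOcSpec by one row
theorem pvOcStep (genome : List (List Int)) (m : Nat) :
    ((PySem.List.pyRange 0 ((m : Int) + 1) 1).foldl
      (fun oc j =>
        if 0 < PySem.List.pyGetD (PySem.List.pyGetD genome (m : Int) []) j 0 then
          oc.set j.toNat 1
        else oc)
      (pvOcSpec genome m))
    = pvOcSpec genome (m + 1) := by
  apply List.ext_getElem?
  intro k
  rw [show ((m : Int) + 1) = ((m + 1 : Nat) : Int) by push_cast; ring]
  by_cases hk : k < genome.length
  · rw [pvSetFold_getElem?
        (fun j => 0 < PySem.List.pyGetD (PySem.List.pyGetD genome (m : Int) []) j 0)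
        (m + 1) _ k (by simp [pvOcSpec, hk])]
    simp only [pvOcSpec, List.getElem?_map, List.getElem?_range hk, Option.map_some,
      PySem.List.pyGetD_natCast]
    have hval : (genome.getD m []).getD k 0 = pvVal genome m k := rfl
    have hhit : pvHit genome (m + 1) k
        = (pvHit genome m k || (decide (k ≤ m) && decide (0 < pvVal genome m k))) := by
      simp [pvHit, List.range_succ]
    by_cases h1 : k < m + 1 ∧ 0 < pvVal genome m k
    · rw [if_pos (by exact ⟨h1.1, by simpa [hval] using h1.2⟩)]
      have : (decide (k ≤ m) && decide (0 < pvVal genome m k)) = true := by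
        simp [h1.2, show k ≤ m by omega]
      simp [hhit, this]
    · rw [if_neg (by rintro ⟨ha, hb⟩; exact h1 ⟨ha, by simpa [hval] using hb⟩)]
      have : (decide (k ≤ m) && decide (0 < pvVal genome m k)) = false := by
        rcases Decidable.not_and_iff_not_or_not.mp h1 with h | h
        · simp [show ¬ k ≤ m by omega]
        · simp [h]
      simp [hhit, this]
  · rw [List.getElem?_eq_none (by
        rw [pvSetFold_length]; simp [pvOcSpec]; omega),
      List.getElem?_eq_none (by simp [pvOcSpec]; omega)]

-- B's fused fold computes (running total, pvOcSpec, pvIcSpec)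
theorem pvBfold (genome : List (List Int)) :
    ∀ (m : Nat), m ≤ genome.length →
      ((PySem.List.pyRange 0 (m : Int) 1).foldl (pvStepB (genome.length : Int) genome)
        (0, List.replicate genome.length 0, [0]))
      = (((List.range m).map (pvRow genome)).sum,
         pvOcSpec genome (min m (genome.length - 1)),
         pvIcSpec genome (min m (genome.length - 1))) := by
  intro m
  induction m with
  | zero =>
      intro _
      simp [PySem.List.pyRange_one_eq_nil (by omega : (0:Int) ≤ 0), pvOcSpec, pvIcSpec, pvHit,
            List.map_const']
  | succ m ih =>
      intro hm
      have hcast : ((m + 1 : Nat) : Int) = (m : Int) + 1 := by push_cast; ring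
      rw [hcast, PySem.List.pyRange_one_succ_right (by positivity), List.foldl_append,
          ih (by omega)]
      simp only [List.foldl_cons, List.foldl_nil, pvStepB]
      have hsum : ((List.range (m + 1)).map (pvRow genome)).sum
          = ((List.range m).map (pvRow genome)).sum + (PySem.List.pyGetD genome (m : Int) []).sum := by
        simp [List.range_succ, pvRow, PySem.List.pyGetD_natCast]
      by_cases hlt : (m : Int) < (genome.length : Int) - 1
      · rw [if_pos hlt]
        have hm1 : min m (genome.length - 1) = m := by omega
        have hm2 : min (m + 1) (genome.length - 1) = m + 1 := by omega
        rw [hm1, hm2, hsum, pvOcStep]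
        have hic : pvIcSpec genome (m + 1)
            = pvIcSpec genome m ++ [if 0 < (PySem.List.pyGetD genome (m : Int) []).sum then (1 : Int) else 0] := by
          simp [pvIcSpec, List.range_succ, pvRow, PySem.List.pyGetD_natCast]
        rw [hic]
      · rw [if_neg hlt]
        have hm1 : min m (genome.length - 1) = genome.length - 1 := by omega
        have hm2 : min (m + 1) (genome.length - 1) = genome.length - 1 := by omega
        rw [hm1, hm2, hsum]

-- A's output_connection fold builds pvOcSpec
theorem pvA_oc (genome : List (List Int)) (h : 1 ≤ genome.length) :
    ((PySem.List.pyRange 0 ((genome.length : Int) - 1) 1).foldl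
      (fun oc bit =>
        if pvColScan genome bit (PySem.List.pyRange bit ((genome.length : Int) - 1) 1) then
          oc.set bit.toNat 1
        else oc)
      (List.replicate genome.length 0))
    = pvOcSpec genome (genome.length - 1) := by
  rw [show ((genome.length : Int) - 1) = ((genome.length - 1 : Nat) : Int) by omega]
  apply List.ext_getElem?
  intro k
  by_cases hk : k < genome.length
  · rw [pvSetFold_getElem?
        (fun bit => pvColScan genome bit
          (PySem.List.pyRange bit ((genome.length - 1 : Nat) : Int) 1) = true)
        (genome.length - 1) _ k (by simp [hk])]
    simp only [pvOcSpec, List.getElem?_map, List.getElem?_range hk, Option.map_some]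
    by_cases hhit : pvHit genome (genome.length - 1) k = true
    · obtain ⟨i, h1, h2, h3⟩ := (pvHit_iff genome (genome.length - 1) k).mp hhit
      rw [if_pos ⟨by omega, (pvColScan_iff genome (genome.length - 1) k).mpr ⟨i, h1, h2, h3⟩⟩]
      simp [hhit]
    · rw [if_neg (by
        rintro ⟨-, hcs⟩
        exact hhit ((pvHit_iff genome (genome.length - 1) k).mpr
          ((pvColScan_iff genome (genome.length - 1) k).mp hcs)))]
      simp [hk, hhit]
  · rw [List.getElem?_eq_none (by rw [pvSetFold_length]; simp; omega),
      List.getElem?_eq_none (by simp [pvOcSpec]; omega)]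

-- A's input_connection fold builds pvIcSpec
theorem pvA_ic (genome : List (List Int)) (h : 1 ≤ genome.length) :
    ((PySem.List.pyRange 0 ((genome.length : Int) - 1) 1).foldl
      (fun ic node =>
        if 0 < (PySem.List.pyGetD genome node []).sum then ic ++ [1] else ic ++ [0])
      [0])
    = pvIcSpec genome (genome.length - 1) := by
  have hstep : (fun (ic : List Int) node =>
        if 0 < (PySem.List.pyGetD genome node []).sum then ic ++ [1] else ic ++ [0])
      = fun (ic : List Int) node =>
        ic ++ [if 0 < (PySem.List.pyGetD genome node []).sum then (1 : Int) else 0] := by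
    funext ic node
    split <;> rfl
  rw [hstep,
    PySem.List.foldl_append_singleton_eq_map
      (f := fun node => if 0 < (PySem.List.pyGetD genome node []).sum then (1 : Int) else 0),
    show ((genome.length : Int) - 1) = ((genome.length - 1 : Nat) : Int) by omega,
    PySem.List.pyRange_zero_natCast, List.map_map]
  simp [pvIcSpec, pvRow, Function.comp, PySem.List.pyGetD_natCast]

-- ===== VERDICT (by name: the statement is the Claim_ definition above) =====
theorem count_phase_connections_spec : Claim_equal_count_phase_connections := by
  intro genome _ _
  unfold Spec_count_phase_connections
  cases genome with
  | nil => decide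
  | cons g gs =>
      have h : 1 ≤ (g :: gs).length := by simp
      simp only [count_phase_connections, count_phase_connections_alt]
      rw [pvBfold (g :: gs) (g :: gs).length le_rfl, pvA_oc _ h, pvA_ic _ h]
      have hmin : min (g :: gs).length ((g :: gs).length - 1) = (g :: gs).length - 1 := by omega
      rw [hmin]
      have htot : ((g :: gs).map (fun node => node.sum)).sum
          = ((List.range (g :: gs).length).map (pvRow (g :: gs))).sum := by
        rw [show pvRow (g :: gs) = fun i => List.sum ((g :: gs).getD i []) from rfl,
            pvMapGetD List.sum]
      rw [htot]
      have hlen : (pvOcSpec (g :: gs) ((g :: gs).length - 1)).length = (g :: gs).length := by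
        simp [pvOcSpec]
      rw [hlen]
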